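-- pv_equiv track=rewrite | github.com/Jonagish/Jonagish | projMovies.py | findHiGrossFilmByYear
-- ===== SOURCE A (Python) =====
-- def findHiGrossFilmByYear(titleList, genreList, directorList, yearList, runtimeList, revenueList, year):
--     movies = []
--     genres = []
--     directors = []
--     years = []
--     runtimes = []
--     revenues = []
--
--     # Find the films that meet the criteria
--     for i in range(len(yearList)):
--         if year == yearList[i]:
--             movies.append(titleList[i])
--             genres.append(genreList[i])
--             directors.append(directorList[i])
--             years.append(yearList[i])
--             runtimes.append(runtimeList[i])
--             revenues.append(revenueList[i])
--
--
--     maxRev = max(revenues)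
--     # This is for the case where there is more than one
--     movie1 = []
--     genre1 = []
--     director1 = []
--     year1 = []
--     runtime1 = []
--     revenue1 = []
--
--     for i in range(len(revenues)):
--         if maxRev == revenues[i]:
--             movie1.append(movies[i])
--             genre1.append(genres[i])
--             director1.append(directors[i])
--             year1.append(years[i])
--             runtime1.append(runtimes[i])
--             revenue1.append(revenues[i])
--
--     return movie1, genre1, director1, year1, runtime1, revenue1
-- ===== SOURCE B (Python) =====
-- def findHiGrossFilmByYear(titleList, genreList, directorList, yearList, runtimeList, revenueList, year):
--     # one pass to find the top revenue among this year's films (ValueError if none, like A)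
--     maxRev = max(revenueList[i] for i in range(len(yearList)) if yearList[i] == year)
--     movie1, genre1, director1, year1, runtime1, revenue1 = [], [], [], [], [], []
--     for i in range(len(yearList)):
--         if yearList[i] == year and revenueList[i] == maxRev:
--             movie1.append(titleList[i])
--             genre1.append(genreList[i])
--             director1.append(directorList[i])
--             year1.append(yearList[i])
--             runtime1.append(runtimeList[i])
--             revenue1.append(revenueList[i])
--     return movie1, genre1, director1, year1, runtime1, revenue1
-- ===== Notes on version B (the rewrite author's own statement) =====
-- stated objective: simpler
-- what changed: B computes the year's maximum revenue in one generator pass and then collects the six result lists in a single loop with a compound predicate, dropping A's six intermediate filtered lists and its separate second filter pass.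
import Mathlib
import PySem

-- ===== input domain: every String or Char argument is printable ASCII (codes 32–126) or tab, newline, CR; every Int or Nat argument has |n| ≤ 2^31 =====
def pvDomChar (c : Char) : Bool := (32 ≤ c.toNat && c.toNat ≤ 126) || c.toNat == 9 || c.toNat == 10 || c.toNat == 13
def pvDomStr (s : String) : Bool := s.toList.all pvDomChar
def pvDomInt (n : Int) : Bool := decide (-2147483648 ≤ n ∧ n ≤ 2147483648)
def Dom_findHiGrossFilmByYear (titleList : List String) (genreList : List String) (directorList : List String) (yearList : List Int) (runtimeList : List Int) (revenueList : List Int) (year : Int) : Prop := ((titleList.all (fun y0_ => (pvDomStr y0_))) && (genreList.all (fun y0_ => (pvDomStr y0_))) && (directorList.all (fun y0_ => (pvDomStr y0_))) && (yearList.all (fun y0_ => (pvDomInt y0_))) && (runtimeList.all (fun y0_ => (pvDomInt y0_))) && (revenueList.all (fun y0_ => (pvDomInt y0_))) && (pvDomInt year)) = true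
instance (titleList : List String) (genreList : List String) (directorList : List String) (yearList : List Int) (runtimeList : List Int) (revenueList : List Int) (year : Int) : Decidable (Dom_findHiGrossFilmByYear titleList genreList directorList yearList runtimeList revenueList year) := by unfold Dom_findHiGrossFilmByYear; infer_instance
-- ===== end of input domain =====

-- B: single-pass collection with the year's max revenue precomputed, instead of A's six intermediate
-- filtered lists plus a second filter pass; same results, same order, same ties.


-- ===== PORT A =====
def findHiGrossFilmByYear (titleList : List String) (genreList : List String) (directorList : List String) (yearList : List Int) (runtimeList : List Int) (revenueList : List Int) (year : Int) : List String × List String × List String × List Int × List Int × List Int :=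
  -- first loop: for i in range(len(yearList)): if year == yearList[i]: append to the six lists
  let first := (PySem.List.pyRange 0 (yearList.length : Int) 1).foldl
    (fun (s : List String × List String × List String × List Int × List Int × List Int) i =>
      if year == PySem.List.pyGetD yearList i 0 then
        (s.1 ++ [PySem.List.pyGetD titleList i ""],
         s.2.1 ++ [PySem.List.pyGetD genreList i ""],
         s.2.2.1 ++ [PySem.List.pyGetD directorList i ""],
         s.2.2.2.1 ++ [PySem.List.pyGetD yearList i 0],
         s.2.2.2.2.1 ++ [PySem.List.pyGetD runtimeList i 0],
         s.2.2.2.2.2 ++ [PySem.List.pyGetD revenueList i 0])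
      else s)
    ([], [], [], [], [], [])
  let movies := first.1
  let genres := first.2.1
  let directors := first.2.2.1
  let years := first.2.2.2.1
  let runtimes := first.2.2.2.2.1
  let revenues := first.2.2.2.2.2
  -- maxRev = max(revenues)  (ValueError on empty revenues is excluded by Pre_)
  let maxRev := (PySem.List.max? revenues (fun x => x)).getD 0
  -- second loop: for i in range(len(revenues)): if maxRev == revenues[i]: append
  (PySem.List.pyRange 0 (revenues.length : Int) 1).foldl
    (fun (s : List String × List String × List String × List Int × List Int × List Int) i =>
      if maxRev == PySem.List.pyGetD revenues i 0 then
        (s.1 ++ [PySem.List.pyGetD movies i ""],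
         s.2.1 ++ [PySem.List.pyGetD genres i ""],
         s.2.2.1 ++ [PySem.List.pyGetD directors i ""],
         s.2.2.2.1 ++ [PySem.List.pyGetD years i 0],
         s.2.2.2.2.1 ++ [PySem.List.pyGetD runtimes i 0],
         s.2.2.2.2.2 ++ [PySem.List.pyGetD revenues i 0])
      else s)
    ([], [], [], [], [], [])

-- ===== PORT B =====
def findHiGrossFilmByYear_alt (titleList : List String) (genreList : List String) (directorList : List String) (yearList : List Int) (runtimeList : List Int) (revenueList : List Int) (year : Int) : List String × List String × List String × List Int × List Int × List Int :=
  -- maxRev = max(revenueList[i] for i in range(len(yearList)) if yearList[i] == year)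
  let revs := (PySem.List.pyRange 0 (yearList.length : Int) 1).foldl
    (fun acc i => if PySem.List.pyGetD yearList i 0 == year then acc ++ [PySem.List.pyGetD revenueList i 0] else acc) []
  let maxRev := (PySem.List.max? revs (fun x => x)).getD 0
  -- single collection loop with the compound predicate
  (PySem.List.pyRange 0 (yearList.length : Int) 1).foldl
    (fun (s : List String × List String × List String × List Int × List Int × List Int) i =>
      if PySem.List.pyGetD yearList i 0 == year && PySem.List.pyGetD revenueList i 0 == maxRev then
        (s.1 ++ [PySem.List.pyGetD titleList i ""],
         s.2.1 ++ [PySem.List.pyGetD genreList i ""],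
         s.2.2.1 ++ [PySem.List.pyGetD directorList i ""],
         s.2.2.2.1 ++ [PySem.List.pyGetD yearList i 0],
         s.2.2.2.2.1 ++ [PySem.List.pyGetD runtimeList i 0],
         s.2.2.2.2.2 ++ [PySem.List.pyGetD revenueList i 0])
      else s)
    ([], [], [], [], [], [])

-- ===== PRECONDITION & SPEC =====
-- Pre_ is exactly where Python A returns: some index matches the year (else max([]) raises
-- ValueError), and every matching index is in range of all six lists (else IndexError).
def Pre_findHiGrossFilmByYear (titleList : List String) (genreList : List String) (directorList : List String) (yearList : List Int) (runtimeList : List Int) (revenueList : List Int) (year : Int) : Prop :=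
  year ∈ yearList ∧
  ∀ i : Nat, (h : i < yearList.length) → yearList[i] = year →
    (i < titleList.length ∧ i < genreList.length ∧ i < directorList.length ∧
     i < runtimeList.length ∧ i < revenueList.length)
instance (titleList : List String) (genreList : List String) (directorList : List String) (yearList : List Int) (runtimeList : List Int) (revenueList : List Int) (year : Int) : Decidable (Pre_findHiGrossFilmByYear titleList genreList directorList yearList runtimeList revenueList year) := by unfold Pre_findHiGrossFilmByYear; infer_instance

def pvWitness_findHiGrossFilmByYear : List String × List String × List String × List Int × List Int × List Int × Int :=
  (["Titanic", "Up"], ["Drama", "Animation"], ["Cameron", "Docter"], [1997, 2009], [194, 96], [2187, 735], 1997)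

def Spec_findHiGrossFilmByYear (titleList : List String) (genreList : List String) (directorList : List String) (yearList : List Int) (runtimeList : List Int) (revenueList : List Int) (year : Int) (out : List String × List String × List String × List Int × List Int × List Int) : Prop := out = findHiGrossFilmByYear_alt titleList genreList directorList yearList runtimeList revenueList year
instance (titleList : List String) (genreList : List String) (directorList : List String) (yearList : List Int) (runtimeList : List Int) (revenueList : List Int) (year : Int) (out : List String × List String × List String × List Int × List Int × List Int) : Decidable (Spec_findHiGrossFilmByYear titleList genreList directorList yearList runtimeList revenueList year out) := by unfold Spec_findHiGrossFilmByYear; infer_instance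

-- ===== CLAIM (what is proved, stated in full; the proofs are below) =====
def Claim_equal_findHiGrossFilmByYear : Prop := ∀ (titleList : List String) (genreList : List String) (directorList : List String) (yearList : List Int) (runtimeList : List Int) (revenueList : List Int) (year : Int), Dom_findHiGrossFilmByYear titleList genreList directorList yearList runtimeList revenueList year → Pre_findHiGrossFilmByYear titleList genreList directorList yearList runtimeList revenueList year → Spec_findHiGrossFilmByYear titleList genreList directorList yearList runtimeList revenueList year (findHiGrossFilmByYear titleList genreList directorList yearList runtimeList revenueList year)

-- ===== LEMMAS AND PROOFS =====

-- a 6-accumulator append loop is six filter-maps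
theorem pvSplit6 {α β γ : Type} (l : List γ) (c : γ → Bool)
    (f1 f2 f3 : γ → α) (g1 g2 g3 : γ → β)
    (a1 a2 a3 : List α) (b1 b2 b3 : List β) :
    l.foldl
      (fun (s : List α × List α × List α × List β × List β × List β) x =>
        if c x then
          (s.1 ++ [f1 x], s.2.1 ++ [f2 x], s.2.2.1 ++ [f3 x],
           s.2.2.2.1 ++ [g1 x], s.2.2.2.2.1 ++ [g2 x], s.2.2.2.2.2 ++ [g3 x])
        else s)
      (a1, a2, a3, b1, b2, b3)
    = (a1 ++ (l.filter c).map f1, a2 ++ (l.filter c).map f2, a3 ++ (l.filter c).map f3,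
       b1 ++ (l.filter c).map g1, b2 ++ (l.filter c).map g2, b3 ++ (l.filter c).map g3) := by
  induction l generalizing a1 a2 a3 b1 b2 b3 with
  | nil => simp
  | cons x t ih =>
    by_cases h : c x = true
    · simp [List.foldl_cons, h, ih]
    · simp [List.foldl_cons, h, ih]

-- selecting from parallel map-images by a predicate on one of them
theorem pvSelMapAux {α : Type} (L : List Int) (q : Int → Bool) (fr : Int → Int) (ft : Int → α) (d : α) :
    ((List.range L.length).filter (fun j => q ((L.map fr).getD j 0))).map (fun j => (L.map ft).getD j d)
    = (L.filter (fun i => q (fr i))).map ft := by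
  induction L with
  | nil => simp
  | cons i t ih =>
    by_cases h : q (fr i) = true
    · simpa [List.range_succ_eq_map, List.filter_map, List.filter_cons, h,
        Function.comp_def, Nat.succ_eq_add_one, List.getElem?_cons_succ, List.map_map] using ih
    · simpa [List.range_succ_eq_map, List.filter_map, List.filter_cons, h,
        Function.comp_def, Nat.succ_eq_add_one, List.getElem?_cons_succ, List.map_map] using ih

theorem pvSelMap {α : Type} (L : List Int) (q : Int → Bool) (fr : Int → Int) (ft : Int → α) (d : α) :
    ((PySem.List.pyRange 0 (((L.map fr).length : Nat) : Int) 1).filter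
        (fun j => q (PySem.List.pyGetD (L.map fr) j 0))).map
      (fun j => PySem.List.pyGetD (L.map ft) j d)
    = (L.filter (fun i => q (fr i))).map ft := by
  rw [List.length_map, PySem.List.pyRange_zero_natCast, List.filter_map, List.map_map]
  simpa [Function.comp_def, PySem.List.pyGetD_natCast] using pvSelMapAux L q fr ft d

theorem pvIntBeqComm (a b : Int) : (a == b) = (b == a) := by
  by_cases h : a = b
  · simp [h]
  · simp [h, Ne.symm h]

theorem pvCollapse {α : Type} (l : List Int) (yL rL : List Int) (year M : Int) (f : Int → α) :
    ((l.filter (fun i => year == PySem.List.pyGetD yL i 0)).filter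
        (fun i => M == PySem.List.pyGetD rL i 0)).map f
    = (l.filter (fun i =>
        (PySem.List.pyGetD yL i 0 == year) && (PySem.List.pyGetD rL i 0 == M))).map f := by
  rw [List.filter_filter]
  congr 1
  refine List.filter_congr fun x _ => ?_
  rw [pvIntBeqComm M (PySem.List.pyGetD rL x 0), pvIntBeqComm year (PySem.List.pyGetD yL x 0),
    Bool.and_comm]

-- ===== VERDICT (by name: the statement is the Claim_ definition above) =====
theorem findHiGrossFilmByYear_spec : Claim_equal_findHiGrossFilmByYear := by
  intro titleList genreList directorList yearList runtimeList revenueList year _ _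
  show findHiGrossFilmByYear titleList genreList directorList yearList runtimeList revenueList year
      = findHiGrossFilmByYear_alt titleList genreList directorList yearList runtimeList revenueList year
  unfold findHiGrossFilmByYear findHiGrossFilmByYear_alt
  rw [pvSplit6, pvSplit6, pvSplit6, PySem.List.foldl_append_if]
  simp only [List.nil_append]
  -- unify the two year predicates
  rw [show (fun i => PySem.List.pyGetD yearList i 0 == year)
        = (fun i => year == PySem.List.pyGetD yearList i 0) from funext fun i => pvIntBeqComm _ _]
  -- the A side: second pass over the six map-images collapses via pvSelMap
  rw [pvSelMap, pvSelMap, pvSelMap, pvSelMap, pvSelMap, pvSelMap]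
  -- the B side: compound-predicate filter = the A side's filter-then-filter
  rw [pvCollapse, pvCollapse, pvCollapse, pvCollapse, pvCollapse, pvCollapse]
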